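-- pv_equiv track=rewrite | github.com/gitsoep/tourney | backend/app/services/bracket_service.py | _place_players_for_bracket
-- ===== SOURCE A (Python) =====
-- from typing import List, Optional, Dict
--
-- def _place_players_for_bracket(
--     player_ids: List[int],
--     player_pool_map: Optional[Dict[int, int]],
--     bracket_size: int,
-- ) -> List[Optional[int]]:
--     """
--     Place players into bracket positions so that same-pool players are
--     separated as far as possible — they can only meet in the latest
--     possible round (the final, if the bracket is large enough).
--
--     Returns a list of length ``bracket_size`` where each element is a
--     player ID or ``None`` (bye).  Positions 2*i and 2*i+1 are opponents
--     in round-1 match i.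
--
--     The algorithm recursively splits the bracket in half and distributes
--     each pool's members across opposite halves, alternating by pool index
--     and rank so that #1 and #2 from the same pool always land on opposite
--     sides.  Without meaningful pool info it falls back to standard
--     seeding (seed 1 vs seed N, etc.).
--     """
--     has_pool_info = (
--         player_pool_map
--         and len(set(player_pool_map.get(p, 0) for p in player_ids)) >= 2
--     )
--
--     if not has_pool_info:
--         # Fall back to standard bracket seeding
--         slots = _bracket_seeding_slots(bracket_size)
--         padded = list(player_ids) + [None] * (bracket_size - len(player_ids))
--         return [padded[s] if s < len(padded) else None for s in slots]
--
--     result: List[Optional[int]] = [None] * bracket_size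
--
--     def _place(start: int, size: int, players: List[int]):
--         if not players or size == 0:
--             return
--         if size <= 2:
--             for k, pid in enumerate(players[:size]):
--                 result[start + k] = pid
--             return
--
--         half = size // 2
--
--         # Group by pool, preserving rank order within each pool
--         pools: Dict[int, List[int]] = {}
--         for pid in players:
--             pi = player_pool_map.get(pid, 0)
--             pools.setdefault(pi, []).append(pid)
--
--         top: List[int] = []
--         bottom: List[int] = []
--
--         # Distribute each pool's members across the two halves.
--         # Alternate the starting half by pool index so pools spread
--         # evenly; alternate by member rank so same-pool players land
--         # in opposite halves.
--         for i, pk in enumerate(sorted(pools.keys())):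
--             for j, pid in enumerate(pools[pk]):
--                 want_top = (i + j) % 2 == 0
--                 if want_top and len(top) < half:
--                     top.append(pid)
--                 elif not want_top and len(bottom) < half:
--                     bottom.append(pid)
--                 elif len(top) < half:
--                     top.append(pid)
--                 else:
--                     bottom.append(pid)
--
--         _place(start, half, top)
--         _place(start + half, half, bottom)
--
--     _place(0, bracket_size, player_ids)
--     return result
--
-- def _bracket_seeding_slots(n: int) -> List[int]:
--     """
--     Generate standard bracket seeding positions for n slots (power of 2).
--     Seed 1 plays seed n, seed 2 plays seed n-1, etc., arranged so top seeds
--     are on opposite sides of the bracket.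
--
--     Returns a list of seed indices (0-based) in match order:
--     match 0 gets slots[0] vs slots[1], match 1 gets slots[2] vs slots[3], etc.
--     """
--     if n == 1:
--         return [0]
--     if n == 2:
--         return [0, 1]
--
--     # Recursively build the bracket
--     half = _bracket_seeding_slots(n // 2)
--     result = []
--     for seed in half:
--         result.append(seed)
--         result.append(n - 1 - seed)
--     return result
-- ===== SOURCE B (Python) =====
-- from typing import List, Optional, Dict
--
-- def _place_players_for_bracket(
--     player_ids: List[int],
--     player_pool_map: Optional[Dict[int, int]],
--     bracket_size: int,
-- ) -> List[Optional[int]]: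
--     """Pure divide-and-conquer re-implementation: each bracket segment is
--     BUILT as a list and concatenated, instead of writing into a shared
--     result array through start/size indices; the seeding fallback computes
--     its slots with an iterative halving loop instead of recursion."""
--     has_pool_info = (
--         player_pool_map
--         and len(set(player_pool_map.get(p, 0) for p in player_ids)) >= 2
--     )
--     if not has_pool_info:
--         slots = _seeding_slots_iter(bracket_size)
--         padded = list(player_ids) + [None] * (bracket_size - len(player_ids))
--         return [padded[s] if s < len(padded) else None for s in slots]
--     return _segment(bracket_size, player_ids, player_pool_map)
--
-- def _segment(size, players, pool_map):
--     """Content of one bracket segment of length `size`, as a fresh list."""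
--     if not players:
--         return [None] * size
--     if size <= 2:
--         head = list(players[:size])
--         return head + [None] * (size - len(head))
--     half = size // 2
--     top, bottom = _split_halves(players, half, pool_map)
--     return (_segment(half, top, pool_map)
--             + _segment(half, bottom, pool_map)
--             + [None] * (size - 2 * half))
--
-- def _split_halves(players, half, pool_map):
--     pools = {}
--     for pid in players:
--         pools.setdefault(pool_map.get(pid, 0), []).append(pid)
--     order = [((i + j) % 2 == 0, pid)
--              for i, pk in enumerate(sorted(pools))
--              for j, pid in enumerate(pools[pk])]
--     top, bottom = [], []
--     for want_top, pid in order: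
--         if want_top and len(top) < half:
--             top.append(pid)
--         elif not want_top and len(bottom) < half:
--             bottom.append(pid)
--         elif len(top) < half:
--             top.append(pid)
--         else:
--             bottom.append(pid)
--     return top, bottom
--
-- def _seeding_slots_iter(n):
--     sizes = []
--     m = n
--     while m > 2:
--         sizes.append(m)
--         m //= 2
--     res = [0] if m == 1 else [0, 1]
--     for sz in reversed(sizes):
--         res = [x for seed in res for x in (seed, sz - 1 - seed)]
--     return res
-- ===== Notes on version B (the rewrite author's own statement) =====
-- stated objective: alternative
-- what changed: B builds each bracket segment as a fresh list by pure divide-and-conquer concatenation (with explicit None padding) instead of writing through start/size indices into a shared result array, flattens the pool distribution into a single fold over a precomputed (parity, pid) order list, and computes the seeding-fallback slots by an iterative halving loop with flatMap expansion instead of recursion.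
import Mathlib
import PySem

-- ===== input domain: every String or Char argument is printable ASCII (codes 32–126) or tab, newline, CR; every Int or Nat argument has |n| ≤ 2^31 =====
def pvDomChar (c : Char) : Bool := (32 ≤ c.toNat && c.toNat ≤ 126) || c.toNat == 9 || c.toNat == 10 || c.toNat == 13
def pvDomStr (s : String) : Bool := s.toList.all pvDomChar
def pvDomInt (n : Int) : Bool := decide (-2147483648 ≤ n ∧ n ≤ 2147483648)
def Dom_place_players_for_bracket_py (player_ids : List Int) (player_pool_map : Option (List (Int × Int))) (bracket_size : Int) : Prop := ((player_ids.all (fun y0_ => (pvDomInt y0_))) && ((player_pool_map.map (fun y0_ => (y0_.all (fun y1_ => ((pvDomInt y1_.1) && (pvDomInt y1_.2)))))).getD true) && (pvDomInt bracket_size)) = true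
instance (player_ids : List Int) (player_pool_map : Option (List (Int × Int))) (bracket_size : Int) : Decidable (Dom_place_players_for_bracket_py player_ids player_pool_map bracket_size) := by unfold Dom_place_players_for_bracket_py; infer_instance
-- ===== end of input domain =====

-- B replaces A's index-writing recursion over a shared result array by pure segment
-- concatenation and replaces the recursive seeding-slot builder by an iterative halving
-- loop (objective: alternative, same cost).

-- ===== PORT A =====

-- shared guard: `player_pool_map and len(set(player_pool_map.get(p, 0) for p in player_ids)) >= 2`
def pvHasPool (player_ids : List Int) (player_pool_map : Option (List (Int × Int))) : Bool :=
  match player_pool_map with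
  | none => false
  | some m =>
      !m.isEmpty &&
        decide (2 ≤ (PySem.Set.ofList (player_ids.map
          (fun p => PySem.Dict.getD (PySem.Dict.mk m) p 0))).length)

-- `_bracket_seeding_slots`, literal recursion; for n ≤ 0 (where Python recurses forever,
-- RecursionError — excluded by Pre_) the dead third branch returns [] for totality.
def pvSlotsA (n : Int) : List Int :=
  if n = 1 then [0]
  else if n = 2 then [0, 1]
  else if n ≤ 2 then []
  else
    (pvSlotsA (PySem.Int.floordiv n 2)).foldl (fun acc seed => acc ++ [seed, n - 1 - seed]) []
termination_by n.toNat
decreasing_by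
  rename_i h1 h2 h3
  rw [PySem.Int.floordiv_eq_ediv_of_pos (by omega : (0:Int) < 2)]
  omega

-- the inner `_place(start, size, players)` closure; `result[start + k] = pid` is
-- PySem.List.pySetD (in range on every call reached under Pre_)
def pvPlaceA (pm : PySem.Dict Int Int) (start size : Int) (players : List Int)
    (result : List (Option Int)) : List (Option Int) :=
  if players = [] ∨ size = 0 then result
  else if size ≤ 2 then
    (PySem.List.slice players none (some size)).zipIdx.foldl
      (fun r pk => PySem.List.pySetD r (start + (pk.2 : Int)) (some pk.1)) result
  else
    let half := PySem.Int.floordiv size 2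
    let pools : PySem.Dict Int (List Int) :=
      players.foldl (fun d pid => d.modify (pm.getD pid 0) [] (fun l => l ++ [pid]))
        PySem.Dict.empty
    let tb :=
      (PySem.List.sorted pools.keys (fun k => k) false).zipIdx.foldl
        (fun (tb : List Int × List Int) ki =>
          (pools.getD ki.1 []).zipIdx.foldl
            (fun (tb2 : List Int × List Int) pj =>
              if PySem.Int.mod ((ki.2 : Int) + (pj.2 : Int)) 2 = 0 ∧ (tb2.1.length : Int) < half then
                (tb2.1 ++ [pj.1], tb2.2)
              else if ¬ PySem.Int.mod ((ki.2 : Int) + (pj.2 : Int)) 2 = 0 ∧ (tb2.2.length : Int) < half then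
                (tb2.1, tb2.2 ++ [pj.1])
              else if (tb2.1.length : Int) < half then
                (tb2.1 ++ [pj.1], tb2.2)
              else
                (tb2.1, tb2.2 ++ [pj.1])) tb) ([], [])
    pvPlaceA pm (start + half) half tb.2 (pvPlaceA pm start half tb.1 result)
termination_by size.toNat
decreasing_by
  all_goals
    rename_i h1 h2
    rw [PySem.Int.floordiv_eq_ediv_of_pos (by omega : (0:Int) < 2)]
    omega

def place_players_for_bracket_py (player_ids : List Int) (player_pool_map : Option (List (Int × Int))) (bracket_size : Int) : List (Option Int) :=
  if pvHasPool player_ids player_pool_map = false then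
    let slots := pvSlotsA bracket_size
    let padded : List (Option Int) :=
      player_ids.map some ++ List.replicate (bracket_size - (player_ids.length : Int)).toNat none
    slots.map (fun s =>
      if s < (padded.length : Int) then (PySem.List.pyGet? padded s).getD none else none)
  else
    pvPlaceA (PySem.Dict.mk (player_pool_map.getD [])) 0 bracket_size player_ids
      (List.replicate bracket_size.toNat none)

-- ===== PORT B =====

-- the `while m > 2` halving loop of `_seeding_slots_iter`: collected sizes and final m
def pvChainB (n : Int) : List Int × Int :=
  if n > 2 then
    let p := pvChainB (PySem.Int.floordiv n 2)
    (n :: p.1, p.2)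
  else ([], n)
termination_by n.toNat
decreasing_by
  rename_i h
  rw [PySem.Int.floordiv_eq_ediv_of_pos (by omega : (0:Int) < 2)]
  omega

def pvSlotsB (n : Int) : List Int :=
  let p := pvChainB n
  let res0 : List Int := if p.2 = 1 then [0] else [0, 1]
  p.1.reverse.foldl (fun res sz => res.flatMap (fun seed => [seed, sz - 1 - seed])) res0

-- `_split_halves`: group, flatten to an order list of (want_top, pid), one fold
def pvSplitB (pm : PySem.Dict Int Int) (players : List Int) (half : Int) :
    List Int × List Int :=
  let pools : PySem.Dict Int (List Int) :=
    players.foldl (fun d pid => d.modify (pm.getD pid 0) [] (fun l => l ++ [pid]))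
      PySem.Dict.empty
  let order : List (Bool × Int) :=
    (PySem.List.sorted pools.keys (fun k => k) false).zipIdx.flatMap (fun ki =>
      (pools.getD ki.1 []).zipIdx.map (fun pj =>
        (decide (PySem.Int.mod ((ki.2 : Int) + (pj.2 : Int)) 2 = 0), pj.1)))
  order.foldl
    (fun (tb : List Int × List Int) wp =>
      if wp.1 = true ∧ (tb.1.length : Int) < half then (tb.1 ++ [wp.2], tb.2)
      else if ¬ wp.1 = true ∧ (tb.2.length : Int) < half then (tb.1, tb.2 ++ [wp.2])
      else if (tb.1.length : Int) < half then (tb.1 ++ [wp.2], tb.2)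
      else (tb.1, tb.2 ++ [wp.2])) ([], [])

-- `_segment`: build the segment's contents directly
def pvSegB (pm : PySem.Dict Int Int) (size : Int) (players : List Int) :
    List (Option Int) :=
  if players = [] then List.replicate size.toNat none
  else if size ≤ 2 then
    let head := PySem.List.slice players none (some size)
    head.map some ++ List.replicate (size - (head.length : Int)).toNat none
  else
    let half := PySem.Int.floordiv size 2
    let tb := pvSplitB pm players half
    pvSegB pm half tb.1 ++ pvSegB pm half tb.2 ++
      List.replicate (size - 2 * half).toNat none
termination_by size.toNat
decreasing_by
  all_goals
    rename_i h1 h2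
    rw [PySem.Int.floordiv_eq_ediv_of_pos (by omega : (0:Int) < 2)]
    omega

def place_players_for_bracket_py_alt (player_ids : List Int) (player_pool_map : Option (List (Int × Int))) (bracket_size : Int) : List (Option Int) :=
  if pvHasPool player_ids player_pool_map = false then
    let slots := pvSlotsB bracket_size
    let padded : List (Option Int) :=
      player_ids.map some ++ List.replicate (bracket_size - (player_ids.length : Int)).toNat none
    slots.map (fun s =>
      if s < (padded.length : Int) then (PySem.List.pyGet? padded s).getD none else none)
  else
    pvSegB (PySem.Dict.mk (player_pool_map.getD [])) bracket_size player_ids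


-- ===== PRECONDITION & SPEC =====
-- Pre_ excludes exactly the inputs where A raises: without usable pool info A's seeding
-- fallback needs bracket_size ≥ 1 (RecursionError otherwise); with pool info a negative
-- bracket_size raises IndexError unless the players fit in the empty slice (there A
-- returns the empty bracket, which stays inside Pre_).
def Pre_place_players_for_bracket_py (player_ids : List Int) (player_pool_map : Option (List (Int × Int))) (bracket_size : Int) : Prop :=
  if pvHasPool player_ids player_pool_map = true then
    0 ≤ bracket_size ∨ (player_ids.length : Int) + bracket_size ≤ 0
  else 1 ≤ bracket_size
instance (player_ids : List Int) (player_pool_map : Option (List (Int × Int))) (bracket_size : Int) : Decidable (Pre_place_players_for_bracket_py player_ids player_pool_map bracket_size) := by unfold Pre_place_players_for_bracket_py; infer_instance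

def pvWitness_place_players_for_bracket_py : List Int × (Option (List (Int × Int))) × Int :=
  ([1, 2, 3, 4], some [(1, 1), (2, 1), (3, 2), (4, 2)], 4)

def Spec_place_players_for_bracket_py (player_ids : List Int) (player_pool_map : Option (List (Int × Int))) (bracket_size : Int) (out : List (Option Int)) : Prop := out = place_players_for_bracket_py_alt player_ids player_pool_map bracket_size
instance (player_ids : List Int) (player_pool_map : Option (List (Int × Int))) (bracket_size : Int) (out : List (Option Int)) : Decidable (Spec_place_players_for_bracket_py player_ids player_pool_map bracket_size out) := by unfold Spec_place_players_for_bracket_py; infer_instance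

-- ===== CLAIM (what is proved, stated in full; the proofs are below) =====
def Claim_equal_place_players_for_bracket_py : Prop := ∀ (player_ids : List Int) (player_pool_map : Option (List (Int × Int))) (bracket_size : Int), Dom_place_players_for_bracket_py player_ids player_pool_map bracket_size → Pre_place_players_for_bracket_py player_ids player_pool_map bracket_size → Spec_place_players_for_bracket_py player_ids player_pool_map bracket_size (place_players_for_bracket_py player_ids player_pool_map bracket_size)

-- ===== LEMMAS AND PROOFS =====

lemma pvDecomp (result : List (Option Int)) (s nn : Nat) :
    result = result.take s ++ (result.drop s).take nn ++ result.drop (s + nn) := by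
  have h1 : result.drop (s + nn) = (result.drop s).drop nn := by
    rw [List.drop_drop]
  rw [h1, List.append_assoc, List.take_append_drop, List.take_append_drop]

lemma pvSegB_zero (pm : PySem.Dict Int Int) (players : List Int) :
    pvSegB pm 0 players = [] := by
  rw [pvSegB]
  split
  · simp
  · rw [if_pos (by omega : (0:Int) ≤ 2)]
    simp [PySem.List.slice_to players (le_refl (0:Int))]

lemma pvSplit_eq (pm : PySem.Dict Int Int) (players : List Int) (half : Int) :
    ((PySem.List.sorted
        (players.foldl (fun d pid => d.modify (pm.getD pid 0) [] (fun l => l ++ [pid]))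
          PySem.Dict.empty : PySem.Dict Int (List Int)).keys (fun k => k) false).zipIdx.foldl
      (fun (tb : List Int × List Int) ki =>
        (((players.foldl (fun d pid => d.modify (pm.getD pid 0) [] (fun l => l ++ [pid]))
            PySem.Dict.empty : PySem.Dict Int (List Int))).getD ki.1 []).zipIdx.foldl
          (fun (tb2 : List Int × List Int) pj =>
            if PySem.Int.mod ((ki.2 : Int) + (pj.2 : Int)) 2 = 0 ∧ (tb2.1.length : Int) < half then
              (tb2.1 ++ [pj.1], tb2.2)
            else if ¬ PySem.Int.mod ((ki.2 : Int) + (pj.2 : Int)) 2 = 0 ∧ (tb2.2.length : Int) < half then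
              (tb2.1, tb2.2 ++ [pj.1])
            else if (tb2.1.length : Int) < half then
              (tb2.1 ++ [pj.1], tb2.2)
            else
              (tb2.1, tb2.2 ++ [pj.1])) tb) ([], []))
    = pvSplitB pm players half := by
  unfold pvSplitB
  simp only [List.foldl_flatMap, List.foldl_map, decide_eq_true_eq]

lemma pvSegB_length (pm : PySem.Dict Int Int) :
    ∀ (size : Int) (players : List Int), 0 ≤ size →
      (pvSegB pm size players).length = size.toNat := by
  suffices h : ∀ (k : Nat) (size : Int) (players : List Int), size.toNat ≤ k → 0 ≤ size →
      (pvSegB pm size players).length = size.toNat by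
    intro size players h0; exact h size.toNat size players le_rfl h0
  intro k
  induction k with
  | zero =>
    intro size players hk h0
    have : size = 0 := by omega
    subst this
    rw [pvSegB_zero]
    simp
  | succ k ih =>
    intro size players hk h0
    rw [pvSegB]
    split
    · simp
    · split
      · rename_i hne h2
        simp only [PySem.List.slice_to players h0]
        simp only [List.length_append, List.length_map, List.length_take, List.length_replicate]
        simp only [List.length_take] at *
        omega
      · rename_i hne h2
        have hfd : PySem.Int.floordiv size 2 = size / 2 :=
          PySem.Int.floordiv_eq_ediv_of_pos (by omega)
        simp only [List.length_append, List.length_replicate, hfd]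
        rw [ih (size / 2) _ (by omega) (by omega), ih (size / 2) _ (by omega) (by omega)]
        omega

lemma pvPlaceA_eq_segB (pm : PySem.Dict Int Int) :
    ∀ (n : Nat) (size : Int) (players : List Int) (start : Int) (result : List (Option Int)),
      size.toNat ≤ n → 0 ≤ start → 0 ≤ size →
      start.toNat + size.toNat ≤ result.length →
      (result.drop start.toNat).take size.toNat = List.replicate size.toNat (none : Option Int) →
      pvPlaceA pm start size players result
        = result.take start.toNat ++ pvSegB pm size players
            ++ result.drop (start.toNat + size.toNat) := by
  intro n
  induction n with
  | zero =>
    intro size players start result hk hs0 hsz hlen hnone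
    have h0 : size = 0 := by omega
    subst h0
    rw [pvPlaceA, if_pos (Or.inr rfl), pvSegB_zero]
    simpa using (pvDecomp result start.toNat 0).symm ▸ rfl
  | succ k ih =>
    intro size players start result hk hs0 hsz hlen hnone
    by_cases hpl : players = []
    · -- A returns result untouched; B's segment is all-None = the untouched slice
      rw [pvPlaceA, if_pos (Or.inl hpl)]
      subst hpl
      rw [pvSegB, if_pos rfl, ← hnone]
      exact pvDecomp result start.toNat size.toNat
    · by_cases hsz0 : size = 0
      · subst hsz0
        rw [pvPlaceA, if_pos (Or.inr rfl), pvSegB_zero]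
        simpa using (pvDecomp result start.toNat 0).symm ▸ rfl
      · by_cases h2 : size ≤ 2
        · rw [pvPlaceA, if_neg (by simp [hpl, hsz0]), if_pos h2]
          rw [pvSegB, if_neg hpl, if_pos h2]
          simp only [PySem.List.slice_to players hsz]
          have hslt : start.toNat < result.length := by omega
          rcases players with _ | ⟨p, ps⟩
          · exact absurd rfl hpl
          have h12 : size = 1 ∨ size = 2 := by omega
          rcases h12 with h1 | h1
          · subst h1
            simp only [show (1:Int).toNat = 1 from rfl, List.take_succ_cons, List.take_zero]
            simp only [List.zipIdx, List.foldl_cons, List.foldl_nil, Nat.cast_zero, add_zero]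
            rw [PySem.List.pySetD_of_nonneg _ _ hs0, List.set_eq_take_cons_drop _ hslt]
            simp
          · subst h1
            have hs1lt : start.toNat + 1 < result.length := by omega
            have hdrop1 : result.drop (start.toNat + 1)
                = none :: result.drop (start.toNat + 2) := by
              have hg : result[start.toNat + 1] = none := by
                have h1 := congrArg (fun l => l[1]?) hnone
                simp only [show (2:Int).toNat = 2 from rfl] at h1
                simp only [List.getElem?_take, List.getElem?_drop, List.getElem?_replicate] at h1
                simp at h1
                have h2 := List.getElem?_eq_getElem (l := result) (i := start.toNat + 1) (by omega)
                exact Option.some.inj (h2.symm.trans h1)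
              rw [List.drop_eq_getElem_cons hs1lt, hg]
            rcases ps with _ | ⟨q, qs⟩
            · -- players = [p], size = 2 : one write, second slot stays None
              simp only [show (2:Int).toNat = 2 from rfl, List.take_succ_cons, List.take_nil]
              simp only [List.zipIdx, List.foldl_cons, List.foldl_nil, Nat.cast_zero, add_zero]
              rw [PySem.List.pySetD_of_nonneg _ _ hs0, List.set_eq_take_cons_drop _ hslt]
              rw [hdrop1]
              simp
            · -- players = p :: q :: _, size = 2 : two writes
              simp only [show (2:Int).toNat = 2 from rfl, List.take_succ_cons, List.take_zero]
              simp only [List.zipIdx, List.foldl_cons, List.foldl_nil, Nat.cast_zero,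
                Nat.zero_add, Nat.cast_one, add_zero]
              rw [PySem.List.pySetD_of_nonneg _ _ hs0,
                PySem.List.pySetD_of_nonneg _ _ (by omega : (0:Int) ≤ start + 1),
                show (start + 1).toNat = start.toNat + 1 by omega,
                List.set_eq_take_cons_drop _ hslt, hdrop1,
                List.set_append_right _ _ (by simp only [List.length_take]; omega)]
              have hlt : (List.take start.toNat result).length = start.toNat := by
                simp only [List.length_take]; omega
              rw [hlt, show start.toNat + 1 - start.toNat = 1 from by omega]
              simp
        · -- size >= 3: two recursive child placements
          have h3 : (3:Int) ≤ size := by omega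
          have hfd : PySem.Int.floordiv size 2 = size / 2 :=
            PySem.Int.floordiv_eq_ediv_of_pos (by omega)
          rw [pvPlaceA, if_neg (by simp [hpl, hsz0]), if_neg h2]
          rw [pvSegB, if_neg hpl, if_neg h2]
          simp only [hfd, pvSplit_eq pm players (size / 2)]
          set tb := pvSplitB pm players (size / 2) with htb
          have hfpos : (0:Int) ≤ size / 2 := by omega
          have hfk : (size / 2).toNat ≤ k := by omega
          have h2h : 2 * (size / 2).toNat ≤ size.toNat := by omega
          have hhnn : (size / 2).toNat ≤ size.toNat := by omega
          have hstn : (start + size / 2).toNat = start.toNat + (size / 2).toNat := by omega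
          have hnone1 : (result.drop start.toNat).take (size / 2).toNat
              = List.replicate (size / 2).toNat (none : Option Int) := by
            have h := congrArg (List.take (size / 2).toNat) hnone
            simpa [List.take_take, List.take_replicate, min_eq_left hhnn] using h
          rw [ih (size / 2) tb.1 start result hfk hs0 hfpos (by omega) hnone1]
          set A := List.take start.toNat result with hAdef
          set B1 := pvSegB pm (size / 2) tb.1 with hB1def
          set C := List.drop (start.toNat + (size / 2).toNat) result with hCdef
          have hA : A.length = start.toNat := by
            rw [hAdef, List.length_take]; omega
          have hB : B1.length = (size / 2).toNat := pvSegB_length pm _ _ hfpos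
          have hAB : (A ++ B1).length = start.toNat + (size / 2).toNat := by
            simp [List.length_append, hA, hB]
          -- the right child's segment of the intermediate array is still all-None
          have hdropR1 : (A ++ B1 ++ C).drop (start.toNat + (size / 2).toNat) = C := by
            rw [List.drop_append, List.drop_eq_nil_of_le (by simp [hAB]), hAB]
            simp
          have hCnone : (List.drop (start.toNat + (size / 2).toNat) result).take (size / 2).toNat
              = List.replicate (size / 2).toNat (none : Option Int) := by
            have h := congrArg (List.drop (size / 2).toNat) hnone
            rw [List.drop_take, List.drop_drop, List.drop_replicate] at h
            have h2 := congrArg (List.take (size / 2).toNat) h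
            rw [List.take_take, List.take_replicate, min_eq_left (by omega)] at h2
            exact h2
          have hlenABC : (A ++ B1 ++ C).length = result.length := by
            simp only [List.length_append, hA, hB, hCdef, List.length_drop]
            omega
          have hnone2 : ((A ++ B1 ++ C).drop ((start + size / 2).toNat)).take (size / 2).toNat
              = List.replicate (size / 2).toNat (none : Option Int) := by
            rw [hstn, hdropR1]; exact hCnone
          have IH2 := ih (size / 2) tb.2 (start + size / 2) (A ++ B1 ++ C) hfk (by omega) hfpos
            (by rw [hlenABC, hstn]; omega) hnone2
          rw [IH2, hstn]
          have htake : (A ++ B1 ++ C).take (start.toNat + (size / 2).toNat) = A ++ B1 := by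
            rw [List.take_append, List.take_of_length_le (by simp [hAB]), hAB]
            simp
          have hdrop2 : (A ++ B1 ++ C).drop (start.toNat + (size / 2).toNat + (size / 2).toNat)
              = List.drop (start.toNat + 2 * (size / 2).toNat) result := by
            rw [List.drop_append, List.drop_eq_nil_of_le (by simp [hAB]), hAB,
              show start.toNat + (size / 2).toNat + (size / 2).toNat
                  - (start.toNat + (size / 2).toNat) = (size / 2).toNat from by omega,
              hCdef, List.drop_drop]
            simp only [List.nil_append]
            congr 1
            omega
          rw [htake, hdrop2]
          -- the gap between the two half-segments and the tail of the parent segment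
          have hgap : List.drop (start.toNat + 2 * (size / 2).toNat) result
              = List.replicate (size.toNat - 2 * (size / 2).toNat) (none : Option Int)
                  ++ List.drop (start.toNat + size.toNat) result := by
            have h := congrArg (List.drop (2 * (size / 2).toNat)) hnone
            rw [List.drop_take, List.drop_drop, List.drop_replicate] at h
            conv_lhs => rw [← List.take_append_drop (size.toNat - 2 * (size / 2).toNat)
              (List.drop (start.toNat + 2 * (size / 2).toNat) result)]
            rw [h, List.drop_drop]
            congr 2
            omega
          rw [hgap, show (size - 2 * (size / 2)).toNat = size.toNat - 2 * (size / 2).toNat by omega]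
          simp [List.append_assoc]

lemma pvSlots_eq : ∀ (n : Int), 1 ≤ n → pvSlotsA n = pvSlotsB n := by
  suffices h : ∀ (k : Nat) (n : Int), n.toNat ≤ k → 1 ≤ n → pvSlotsA n = pvSlotsB n by
    intro n h1; exact h n.toNat n le_rfl h1
  intro k
  induction k with
  | zero => intro n h0 h1; omega
  | succ k ih =>
    intro n hk h1
    by_cases e1 : n = 1
    · subst e1
      rw [pvSlotsA, pvSlotsB, pvChainB]
      norm_num
    · by_cases e2 : n = 2
      · subst e2
        rw [pvSlotsA, pvSlotsB, pvChainB]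
        norm_num
      · have h3 : ¬ n ≤ 2 := by omega
        have hfd : PySem.Int.floordiv n 2 = n / 2 :=
          PySem.Int.floordiv_eq_ediv_of_pos (by omega)
        rw [pvSlotsA, if_neg e1, if_neg e2, if_neg h3, hfd,
          ih (n / 2) (by omega) (by omega)]
        conv_rhs => rw [pvSlotsB]
        rw [pvChainB, if_pos (by omega : n > 2), hfd]
        simp only [List.reverse_cons, List.foldl_append, List.foldl_cons, List.foldl_nil]
        rw [PySem.List.foldl_append_eq_flatMap (g := fun seed => [seed, n - 1 - seed])]
        rw [pvSlotsB]
        simp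

-- ===== VERDICT (by name: the statement is the Claim_ definition above) =====
theorem place_players_for_bracket_py_spec : Claim_equal_place_players_for_bracket_py := by
  intro ids pm bs _hDom hPre
  unfold Spec_place_players_for_bracket_py place_players_for_bracket_py place_players_for_bracket_py_alt
  unfold Pre_place_players_for_bracket_py at hPre
  by_cases h : pvHasPool ids pm = false
  · -- fallback seeding branch: only the slot list differs, and the two agree for bs ≥ 1
    have h1 : (1:Int) ≤ bs := by rw [if_neg (by simp [h])] at hPre; exact hPre
    simp only [if_pos h]
    rw [pvSlots_eq bs h1]
  · -- pool branch
    have htrue : pvHasPool ids pm = true := by simpa using h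
    rw [if_pos htrue] at hPre
    rw [if_neg (by simp [htrue]), if_neg (by simp [htrue])]
    by_cases hbs : (0:Int) ≤ bs
    · have hmain := pvPlaceA_eq_segB (PySem.Dict.mk (pm.getD [])) bs.toNat bs ids 0
        (List.replicate bs.toNat none) le_rfl le_rfl hbs (by simp) (by simp)
      simpa using hmain
    · -- bs < 0, so len(player_ids) + bs ≤ 0: both sides are the empty bracket
      have hneg : (ids.length : Int) + bs ≤ 0 := by
        rcases hPre with h1 | h1
        · omega
        · exact h1
      rw [show List.replicate bs.toNat (none : Option Int) = [] by
        simp [Int.toNat_of_nonpos (by omega : bs ≤ 0)]]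
      rcases ids with _ | ⟨p, ps⟩
      · rw [pvPlaceA, if_pos (Or.inl rfl), pvSegB, if_pos rfl]
        simp [Int.toNat_of_nonpos (by omega : bs ≤ 0)]
      · have hsl : PySem.List.slice (p :: ps) none (some bs) = [] := by
          rw [show bs = -(((-bs).toNat : Nat) : Int) by omega,
            PySem.List.slice_to_neg_natCast _ _ (by omega)]
          rw [show (p :: ps).length - (-bs).toNat = 0 by omega]
          rfl
        rw [pvPlaceA, if_neg (by simp; omega), if_pos (by omega : bs ≤ 2), hsl]
        rw [pvSegB, if_neg (by simp), if_pos (by omega : bs ≤ 2), hsl]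
        simp [Int.toNat_of_nonpos (by omega : bs ≤ 0)]
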